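-- pv_equiv track=rewrite | github.com/hzwuhao8/ccc | 2014/j3.py | my_run
-- ===== SOURCE A (Python) =====
-- def my_run(data):
--     a = 100
--     d = 100
--     for xa, xd in data:
--         if xa > xd:
--             d -= xa
--         elif xa == xd:
--             pass
--         else:
--             a -= xd
--     return [a, d]
-- ===== SOURCE B (Python) =====
-- def my_run(data):
--     # Map each game to a penalty vector (loss for A, loss for D),
--     # transpose the vectors into two columns, and vector-sum them.
--     pens = [(xd, 0) if xa < xd else ((0, xa) if xd < xa else (0, 0))
--             for xa, xd in data]
--     cols = list(zip(*pens)) or [(), ()]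
--     return [100 - sum(cols[0]), 100 - sum(cols[1])]
-- ===== Notes on version B (the rewrite author's own statement) =====
-- stated objective: alternative
-- what changed: Instead of one branching loop mutating two score accumulators, B maps each pair to a 2-component penalty vector, transposes the vector list into two columns, and returns 100 minus each column sum.
import Mathlib
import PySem

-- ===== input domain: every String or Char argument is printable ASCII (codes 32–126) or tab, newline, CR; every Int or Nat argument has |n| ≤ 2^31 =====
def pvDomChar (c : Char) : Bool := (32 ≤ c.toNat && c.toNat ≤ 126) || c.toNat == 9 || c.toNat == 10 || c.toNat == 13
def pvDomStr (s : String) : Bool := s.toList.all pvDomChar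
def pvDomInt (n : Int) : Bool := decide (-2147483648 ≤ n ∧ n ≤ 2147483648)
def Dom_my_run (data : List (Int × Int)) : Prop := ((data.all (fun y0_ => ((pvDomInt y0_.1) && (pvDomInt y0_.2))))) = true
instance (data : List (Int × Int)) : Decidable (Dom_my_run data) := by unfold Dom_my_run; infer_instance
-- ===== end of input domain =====

-- B replaces A's branching two-accumulator loop by a map to penalty vectors, a transpose, and two column sums (alternative decomposition, same cost).

-- ===== PORT A =====
-- A: one pass folding (a, d) through the branching loop.
def my_run (data : List (Int × Int)) : List Int :=
  let st := data.foldl (fun (s : Int × Int) p =>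
    let (a, d) := s
    let (xa, xd) := p
    if xa > xd then (a, d - xa)
    else if xa == xd then (a, d)
    else (a - xd, d)) (100, 100)
  [st.1, st.2]

-- ===== PORT B =====
-- B: map each game to a penalty vector, transpose (zip(*pens) = unzip), sum each column.
def my_run_alt (data : List (Int × Int)) : List Int :=
  let pens := data.map (fun p =>
    if p.1 < p.2 then (p.2, (0 : Int))
    else if p.2 < p.1 then ((0 : Int), p.1)
    else ((0 : Int), (0 : Int)))
  let cols := pens.unzip
  [100 - cols.1.sum, 100 - cols.2.sum]

-- ===== PRECONDITION & SPEC =====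
def Spec_my_run (data : List (Int × Int)) (out : List Int) : Prop := out = my_run_alt data
instance (data : List (Int × Int)) (out : List Int) : Decidable (Spec_my_run data out) := by unfold Spec_my_run; infer_instance

-- ===== CLAIM (what is proved, stated in full; the proofs are below) =====
def Claim_equal_my_run : Prop := ∀ (data : List (Int × Int)), Dom_my_run data → Spec_my_run data (my_run data)

-- ===== LEMMAS AND PROOFS =====
lemma fold_inv (data : List (Int × Int)) (a d : Int) :
    data.foldl (fun (s : Int × Int) p =>
      let (a, d) := s
      let (xa, xd) := p
      if xa > xd then (a, d - xa)
      else if xa == xd then (a, d)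
      else (a - xd, d)) (a, d)
    = (a - ((data.map (fun p =>
        if p.1 < p.2 then (p.2, (0 : Int))
        else if p.2 < p.1 then ((0 : Int), p.1)
        else ((0 : Int), (0 : Int)))).map Prod.fst).sum,
       d - ((data.map (fun p =>
        if p.1 < p.2 then (p.2, (0 : Int))
        else if p.2 < p.1 then ((0 : Int), p.1)
        else ((0 : Int), (0 : Int)))).map Prod.snd).sum) := by
  induction data generalizing a d with
  | nil => simp
  | cons hd tl ih =>
    obtain ⟨xa, xd⟩ := hd
    simp only [List.map_map, gt_iff_lt, beq_iff_eq] at ih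
    by_cases h1 : xa > xd
    · simp [h1, not_lt_of_gt h1, ih, Prod.ext_iff]
      omega
    · by_cases h2 : xa = xd
      · simp [h2, ih]
      · have h3 : xa < xd := lt_of_le_of_ne (not_lt.mp h1) h2
        simp [h2, h3, not_lt_of_gt h3, ih, Prod.ext_iff]
        omega

-- ===== VERDICT (by name: the statement is the Claim_ definition above) =====
theorem my_run_spec : Claim_equal_my_run := by
  intro data _
  unfold Spec_my_run my_run my_run_alt
  rw [fold_inv]
  simp [List.unzip_eq_map]
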